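-- pv_equiv track=rewrite | github.com/rmcolq/pantheon | bin/extract_kraken_reads.py | get_taxon_list
-- ===== SOURCE A (Python) =====
-- def get_taxon_list(taxon, include_parents, parents, include_children, children):
--     taxon_list = [taxon]
--     if include_parents:
--         lookup = taxon
--         while (lookup in parents and lookup != "1") :
--             lookup = parents[lookup]
--             if lookup != "1":
--                 taxon_list.append(lookup)
--
--     if include_children:
--         lookup = [taxon]
--         while len(lookup) > 0:
--             child = lookup.pop()
--             if child != taxon:
--                 taxon_list.append(child)
--             lookup.extend(children[child])
--     return taxon_list
-- ===== SOURCE B (Python) =====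
-- def get_taxon_list(taxon, include_parents, parents, include_children, children):
--     result = [taxon]
--     if include_parents:
--         result += _ancestors(taxon, parents)
--     if include_children:
--         result += _descendants(taxon, taxon, children)
--     return result
--
--
-- def _ancestors(lookup, parents):
--     if lookup in parents and lookup != "1":
--         parent = parents[lookup]
--         if parent != "1":
--             return [parent] + _ancestors(parent, parents)
--         return []
--     return []
--
--
-- def _descendants(node, taxon, children):
--     out = []
--     for c in reversed(children[node]):
--         if c != taxon:
--             out.append(c)
--         out += _descendants(c, taxon, children)
--     return out
-- ===== Notes on version B (the rewrite author's own statement) =====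
-- stated objective: alternative
-- what changed: A's explicit-stack descendants loop and accumulator while-loop for ancestors are replaced by two pure recursive helpers that each RETURN a list (ancestors by chain recursion, descendants by structural recursion concatenating sub-results over reversed child lists); no shared mutable list, same traversal cost, identical output.
import Mathlib
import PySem

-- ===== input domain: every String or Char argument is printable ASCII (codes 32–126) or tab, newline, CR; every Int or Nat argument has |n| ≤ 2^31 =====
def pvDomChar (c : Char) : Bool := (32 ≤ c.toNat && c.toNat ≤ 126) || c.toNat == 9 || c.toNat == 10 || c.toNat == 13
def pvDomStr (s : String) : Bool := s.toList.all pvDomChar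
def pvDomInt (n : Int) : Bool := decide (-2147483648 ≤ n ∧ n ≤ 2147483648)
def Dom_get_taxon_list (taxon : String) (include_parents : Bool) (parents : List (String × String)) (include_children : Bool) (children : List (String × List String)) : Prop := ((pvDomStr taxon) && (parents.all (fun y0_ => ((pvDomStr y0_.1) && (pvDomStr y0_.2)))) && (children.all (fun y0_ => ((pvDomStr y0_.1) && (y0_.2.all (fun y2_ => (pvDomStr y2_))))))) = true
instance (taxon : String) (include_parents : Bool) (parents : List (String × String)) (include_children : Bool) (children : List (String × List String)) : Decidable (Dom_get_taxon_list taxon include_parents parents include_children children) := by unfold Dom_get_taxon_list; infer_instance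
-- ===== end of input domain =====

-- B replaces A's explicit-stack descendants loop and accumulator while-loop by two pure
-- recursive helpers that each RETURN a list (ancestor chain; descendants as a concatenation of
-- sub-results over reversed child lists); objective: alternative decomposition, same cost.

-- ===== PORT A =====
-- fuel for A's stack loop: an upper bound (exact on inputs satisfying Pre_) on the number of
-- stack pops; only a totality guard.
def pvFuel (children : List (String × List String)) : Nat → String → Nat
  | 0, _ => 1
  | f + 1, n => 1 + ((((PySem.Dict.mk children).get? n).getD []).map (pvFuel children f)).sum

-- the 'while (lookup in parents and lookup != "1")' loop, appending into taxon_list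
def pvA_parentLoop (parents : List (String × String)) : Nat → String → List String → List String
  | 0, _, acc => acc
  | f + 1, lookup, acc =>
    match (PySem.Dict.mk parents).get? lookup with
    | some p =>
        if lookup ≠ "1" then
          (if p ≠ "1" then pvA_parentLoop parents f p (acc ++ [p]) else pvA_parentLoop parents f p acc)
        else acc
    | none => acc

-- the 'while len(lookup) > 0' stack loop; children[child] on a missing key is a Python
-- KeyError — ported as getD [] and excluded by Pre_
def pvA_childLoop (taxon : String) (children : List (String × List String)) : Nat → List String → List String → List String
  | 0, _, acc => acc
  | f + 1, stack, acc =>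
    match stack.getLast? with
    | none => acc
    | some child =>
        pvA_childLoop taxon children f
          (stack.dropLast ++ ((PySem.Dict.mk children).get? child).getD [])
          (if child ≠ taxon then acc ++ [child] else acc)

def get_taxon_list (taxon : String) (include_parents : Bool) (parents : List (String × String)) (include_children : Bool) (children : List (String × List String)) : List String :=
  let taxon_list : List String := [taxon]
  let taxon_list := if include_parents then pvA_parentLoop parents (parents.length + 1) taxon taxon_list else taxon_list
  if include_children then
    pvA_childLoop taxon children (pvFuel children children.length taxon) [taxon] taxon_list
  else taxon_list

-- ===== PORT B =====
-- _ancestors: the ancestor chain of lookup, stopping at "1" or a missing key (pure recursion)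
def pvB_ancestors (parents : List (String × String)) : Nat → String → List String
  | 0, _ => []
  | f + 1, lookup =>
    match (PySem.Dict.mk parents).get? lookup with
    | some p =>
        if lookup ≠ "1" then (if p ≠ "1" then p :: pvB_ancestors parents f p else []) else []
    | none => []

-- _descendants: for each c in reversed(children[node]), c (unless it equals taxon) followed by
-- _descendants(c); depth fuel children.length + 1 is only a totality guard (exact under Pre_);
-- children[node] on a missing key is a KeyError — ported as getD [] and excluded by Pre_
def pvB_desc (taxon : String) (children : List (String × List String)) : Nat → String → List String
  | 0, _ => []
  | f + 1, node =>
      ((((PySem.Dict.mk children).get? node).getD []).reverse).flatMap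
        (fun c => (if c ≠ taxon then [c] else []) ++ pvB_desc taxon children f c)

def get_taxon_list_alt (taxon : String) (include_parents : Bool) (parents : List (String × String)) (include_children : Bool) (children : List (String × List String)) : List String :=
  [taxon]
    ++ (if include_parents then pvB_ancestors parents (parents.length + 1) taxon else [])
    ++ (if include_children then pvB_desc taxon children (children.length + 1) taxon else [])

-- ===== PRECONDITION & SPEC =====
-- chain/graph conditions on the input under which Python A returns at all:
-- pvPGood: the parent chain from taxon escapes (reaches "1" or a missing key) within |parents| steps
def pvPGood (parents : List (String × String)) : Nat → String → Bool
  | 0, n => ((PySem.Dict.mk parents).get? n).isNone || n == "1"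
  | f + 1, n =>
      ((PySem.Dict.mk parents).get? n).isNone || n == "1" ||
        pvPGood parents f (((PySem.Dict.mk parents).get? n).getD n)
-- pvCGood: every descendant of taxon is a key of children and the child graph below taxon is
-- nested at most |children| deep (both hold whenever A terminates: a deeper chain repeats a key,
-- i.e. is a cycle)
def pvCGood (children : List (String × List String)) : Nat → String → Bool
  | 0, n => (PySem.Dict.mk children).get? n == some []
  | f + 1, n =>
      ((PySem.Dict.mk children).get? n).isSome &&
        (((PySem.Dict.mk children).get? n).getD []).all (pvCGood children f)

-- Pre_ holds exactly when Python A returns: with include_parents it excludes parent-pointer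
-- cycles reachable from taxon (A loops forever); with include_children it excludes a missing
-- children key on the descendant closure of taxon (KeyError) and child cycles (A loops forever).
def Pre_get_taxon_list (taxon : String) (include_parents : Bool) (parents : List (String × String)) (include_children : Bool) (children : List (String × List String)) : Prop :=
  (include_parents = true → pvPGood parents parents.length taxon = true) ∧
  (include_children = true → pvCGood children children.length taxon = true)
instance (taxon : String) (include_parents : Bool) (parents : List (String × String)) (include_children : Bool) (children : List (String × List String)) : Decidable (Pre_get_taxon_list taxon include_parents parents include_children children) := by unfold Pre_get_taxon_list; infer_instance

def pvWitness_get_taxon_list : String × Bool × (List (String × String)) × Bool × (List (String × List String)) :=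
  ("t", true, [("t", "1")], true, [("t", ["a"]), ("a", [])])

def Spec_get_taxon_list (taxon : String) (include_parents : Bool) (parents : List (String × String)) (include_children : Bool) (children : List (String × List String)) (out : List String) : Prop := out = get_taxon_list_alt taxon include_parents parents include_children children
instance (taxon : String) (include_parents : Bool) (parents : List (String × String)) (include_children : Bool) (children : List (String × List String)) (out : List String) : Decidable (Spec_get_taxon_list taxon include_parents parents include_children children out) := by unfold Spec_get_taxon_list; infer_instance

-- ===== CLAIM (what is proved, stated in full; the proofs are below) =====
def Claim_equal_get_taxon_list : Prop := ∀ (taxon : String) (include_parents : Bool) (parents : List (String × String)) (include_children : Bool) (children : List (String × List String)), Dom_get_taxon_list taxon include_parents parents include_children children → Pre_get_taxon_list taxon include_parents parents include_children children → Spec_get_taxon_list taxon include_parents parents include_children children (get_taxon_list taxon include_parents parents include_children children)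

-- ===== LEMMAS AND PROOFS =====

theorem pvCGood_mono (children : List (String × List String)) (f : Nat) :
    ∀ n, pvCGood children f n = true → pvCGood children (f + 1) n = true := by
  induction f with
  | zero =>
      intro n h
      simp only [pvCGood] at *
      rcases beq_iff_eq.mp h with h'
      simp [h']
  | succ f ih =>
      intro n h
      simp only [pvCGood, Bool.and_eq_true, List.all_eq_true] at *
      exact ⟨h.1, fun c hc => ih c (h.2 c hc)⟩

theorem pvCGood_child (children : List (String × List String)) (F : Nat) (n c : String)
    (h : pvCGood children F n = true)
    (hc : c ∈ ((PySem.Dict.mk children).get? n).getD []) : pvCGood children F c = true := by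
  cases F with
  | zero =>
      simp only [pvCGood] at h
      rcases beq_iff_eq.mp h with h'
      rw [h'] at hc; simp at hc
  | succ f =>
      simp only [pvCGood, Bool.and_eq_true, List.all_eq_true] at h
      exact pvCGood_mono children f c (h.2 c hc)

theorem pvCGood_zero_children (children : List (String × List String)) (n : String)
    (h : pvCGood children 0 n = true) : ((PySem.Dict.mk children).get? n).getD [] = [] := by
  simp only [pvCGood] at h
  rw [beq_iff_eq.mp h]
  rfl

theorem pvB_desc_congr (taxon : String) (children : List (String × List String)) :
    ∀ (f : Nat) (n : String), pvCGood children f n = true →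
      ∀ f1 f2, f ≤ f1 → f ≤ f2 → pvB_desc taxon children f1 n = pvB_desc taxon children f2 n := by
  intro f
  induction f with
  | zero =>
      intro n h f1 f2 _ _
      have hg := pvCGood_zero_children children n h
      cases f1 <;> cases f2 <;> simp [pvB_desc, hg]
  | succ f ih =>
      intro n h f1 f2 h1 h2
      cases f1 with
      | zero => omega
      | succ f1 =>
        cases f2 with
        | zero => omega
        | succ f2 =>
          simp only [pvCGood, Bool.and_eq_true, List.all_eq_true] at h
          simp only [pvB_desc]
          refine List.flatMap_congr (fun c hc => ?_)
          rw [List.mem_reverse] at hc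
          rw [ih c (h.2 c hc) f1 f2 (by omega) (by omega)]

theorem pvFuel_congr (children : List (String × List String)) :
    ∀ (f : Nat) (n : String), pvCGood children f n = true →
      ∀ f1 f2, f ≤ f1 → f ≤ f2 → pvFuel children f1 n = pvFuel children f2 n := by
  intro f
  induction f with
  | zero =>
      intro n h f1 f2 _ _
      have hg := pvCGood_zero_children children n h
      cases f1 <;> cases f2 <;> simp [pvFuel, hg]
  | succ f ih =>
      intro n h f1 f2 h1 h2
      cases f1 with
      | zero => omega
      | succ f1 =>
        cases f2 with
        | zero => omega
        | succ f2 =>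
          simp only [pvCGood, Bool.and_eq_true, List.all_eq_true] at h
          simp only [pvFuel]
          congr 1
          congr 1
          refine List.map_congr_left (fun c hc => ?_)
          exact ih c (h.2 c hc) f1 f2 (by omega) (by omega)

theorem pvFuel_pos (children : List (String × List String)) (f : Nat) (n : String) :
    1 ≤ pvFuel children f n := by
  cases f <;> simp [pvFuel]

theorem pvB_desc_unfold (taxon : String) (children : List (String × List String)) (F : Nat)
    (n : String) (h : pvCGood children F n = true) :
    pvB_desc taxon children F n =
      ((((PySem.Dict.mk children).get? n).getD []).reverse).flatMap
        (fun c => (if c ≠ taxon then [c] else []) ++ pvB_desc taxon children F c) := by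
  cases F with
  | zero => simp [pvB_desc, pvCGood_zero_children children n h]
  | succ f =>
      simp only [pvCGood, Bool.and_eq_true, List.all_eq_true] at h
      refine Eq.trans (by rfl) (List.flatMap_congr fun c hc => ?_)
      rw [List.mem_reverse] at hc
      rw [pvB_desc_congr taxon children f c (h.2 c hc) f (f + 1) (by omega) (by omega)]

theorem pvFuel_unfold (children : List (String × List String)) (F : Nat) (n : String)
    (h : pvCGood children F n = true) :
    pvFuel children F n =
      1 + ((((PySem.Dict.mk children).get? n).getD []).map (pvFuel children F)).sum := by
  cases F with
  | zero => simp [pvFuel, pvCGood_zero_children children n h]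
  | succ f =>
      simp only [pvCGood, Bool.and_eq_true, List.all_eq_true] at h
      simp only [pvFuel]
      congr 1
      congr 1
      refine List.map_congr_left (fun c hc => ?_)
      exact pvFuel_congr children f c (h.2 c hc) f (f + 1) (by omega) (by omega)

-- A's stack loop computes, for each stack entry from the top down, the entry (unless it is
-- taxon) followed by B's recursive descendant list of that entry
theorem pvA_childLoop_eq (taxon : String) (children : List (String × List String)) (F : Nat) :
    ∀ (fA : Nat) (st acc : List String),
      (∀ n ∈ st, pvCGood children F n = true) →
      (st.map (pvFuel children F)).sum ≤ fA →
      pvA_childLoop taxon children fA st acc =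
        acc ++ st.reverse.flatMap (fun n => (if n ≠ taxon then [n] else []) ++ pvB_desc taxon children F n) := by
  intro fA
  induction fA with
  | zero =>
      intro st acc hg hf
      cases st with
      | nil => simp [pvA_childLoop]
      | cons c cs =>
          exfalso
          have := pvFuel_pos children F c
          simp only [List.map_cons, List.sum_cons] at hf
          omega
  | succ fA ih =>
      intro st acc hg hf
      cases hlast : st.getLast? with
      | none =>
          have : st = [] := List.getLast?_eq_none_iff.mp hlast
          subst this
          simp [pvA_childLoop, hlast]
      | some c =>
          have hsplit : st.dropLast ++ [c] = st := List.dropLast_append_getLast? c hlast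
          have hcmem : c ∈ st := by rw [← hsplit]; simp
          have hcg := hg c hcmem
          have hrest : ∀ n ∈ st.dropLast, pvCGood children F n = true := by
            intro n hn
            exact hg n (by rw [← hsplit]; exact List.mem_append_left _ hn)
          have hgmem : ∀ n ∈ ((PySem.Dict.mk children).get? c).getD [],
              pvCGood children F n = true := fun n hn => pvCGood_child children F c n hcg hn
          have hsum : ((st.dropLast ++ ((PySem.Dict.mk children).get? c).getD []).map
              (pvFuel children F)).sum ≤ fA := by
            have e1 : (st.map (pvFuel children F)).sum =
                ((st.dropLast).map (pvFuel children F)).sum + pvFuel children F c := by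
              rw [← hsplit]; simp
            have e2 := pvFuel_unfold children F c hcg
            simp only [List.map_append, List.sum_append]
            omega
          have := ih (st.dropLast ++ ((PySem.Dict.mk children).get? c).getD [])
            (if c ≠ taxon then acc ++ [c] else acc)
            (by intro n hn
                rcases List.mem_append.mp hn with h1 | h2
                · exact hrest n h1
                · exact hgmem n h2)
            hsum
          simp only [pvA_childLoop, hlast, this]
          rw [← hsplit]
          simp only [List.reverse_append, List.reverse_cons, List.reverse_nil, List.nil_append,
            List.flatMap_append, List.flatMap_cons, List.flatMap_nil, List.append_nil]
          rw [pvB_desc_unfold taxon children F c hcg]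
          by_cases hct : c = taxon <;> simp [hct]

-- the parent while-loop with accumulator equals acc ++ B's recursively built ancestor list
theorem pvA_parentLoop_one (parents : List (String × String)) (f : Nat) (acc : List String) :
    pvA_parentLoop parents f "1" acc = acc := by
  cases f with
  | zero => simp [pvA_parentLoop]
  | succ f =>
      simp only [pvA_parentLoop]
      cases (PySem.Dict.mk parents).get? "1" <;> simp

theorem pvA_parentLoop_eq (parents : List (String × String)) :
    ∀ (f : Nat) (lookup : String) (acc : List String),
      pvA_parentLoop parents f lookup acc = acc ++ pvB_ancestors parents f lookup := by
  intro f
  induction f with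
  | zero => intro lookup acc; simp [pvA_parentLoop, pvB_ancestors]
  | succ f ih =>
      intro lookup acc
      simp only [pvA_parentLoop, pvB_ancestors]
      cases hp : (PySem.Dict.mk parents).get? lookup with
      | none => simp
      | some p =>
          by_cases h1 : lookup = "1"
          · simp [h1]
          · simp only [h1, ne_eq, not_false_eq_true, if_pos]
            by_cases hp1 : p = "1"
            · subst hp1
              simp [pvA_parentLoop_one]
            · simp only [hp1, not_false_eq_true, if_pos]
              rw [ih]
              simp

-- ===== VERDICT (by name: the statement is the Claim_ definition above) =====
theorem get_taxon_list_spec : Claim_equal_get_taxon_list := by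
  intro taxon ip parents ic children _ hpre
  unfold Spec_get_taxon_list
  rcases hpre with ⟨_, hc⟩
  unfold get_taxon_list get_taxon_list_alt
  have hbase : pvA_parentLoop parents (parents.length + 1) taxon [taxon] =
      [taxon] ++ pvB_ancestors parents (parents.length + 1) taxon :=
    pvA_parentLoop_eq parents _ taxon [taxon]
  cases ic with
  | false =>
      cases ip <;> simp [hbase]
  | true =>
      have hcg := hc rfl
      set F := children.length with hF
      set base := [taxon] ++ (if ip = true then pvB_ancestors parents (parents.length + 1) taxon
        else []) with hbdef
      have hbase' : (if ip = true then pvA_parentLoop parents (parents.length + 1) taxon [taxon]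
          else [taxon]) = base := by
        cases ip <;> simp [hbdef, hbase]
      have hA := pvA_childLoop_eq taxon children F (pvFuel children F taxon) [taxon] base
        (by intro n hn; simp at hn; subst hn; exact hcg) (by simp)
      have hcongr := pvB_desc_congr taxon children F taxon hcg F (F + 1) (by omega) (by omega)
      simp only [hbase']
      rw [hA]
      rw [← hcongr]
      have hx : List.flatMap
          (fun n => (if n ≠ taxon then [n] else []) ++ pvB_desc taxon children F n)
          [taxon].reverse = pvB_desc taxon children F taxon := by simp
      rw [hx, hbdef]
      simp only [if_true, List.append_assoc]
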